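-- pv_equiv track=rewrite | github.com/magimetal/dw-port-experiment | engine/shop.py | _add_inventory_item
-- ===== SOURCE A (Python) =====
-- def _add_inventory_item(slots: tuple[int, int, int, int], item_code: int) -> tuple[tuple[int, int, int, int], bool]:
--     # SOURCE: Bank03.asm AddInvItem @ LE01B-LE04A (low nibble first, then high nibble).
--     out = [value & 0xFF for value in slots]
--     code = item_code & 0x0F
--     for idx, value in enumerate(out):
--         low = value & 0x0F
--         high = value & 0xF0
--         if low == 0:
--             out[idx] = high | code
--             return (out[0], out[1], out[2], out[3]), True
--         if high == 0:
--             out[idx] = (code << 4) | low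
--             return (out[0], out[1], out[2], out[3]), True
--     return (out[0], out[1], out[2], out[3]), False
-- ===== SOURCE B (Python) =====
-- def _add_inventory_item(slots, item_code):
--     # Flatten the four bytes into 8 nibbles (low first), find the first zero
--     # nibble, overwrite it with the item code, and repack pairs into bytes.
--     bytes_ = [v & 0xFF for v in slots]
--     nibbles = []
--     for b in bytes_:
--         nibbles.append(b & 0x0F)
--         nibbles.append((b >> 4) & 0x0F)
--     try:
--         i = nibbles.index(0)
--     except ValueError:
--         return (bytes_[0], bytes_[1], bytes_[2], bytes_[3]), False
--     nibbles[i] = item_code & 0x0F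
--     packed = []
--     for j in range(0, len(nibbles), 2):
--         packed.append(nibbles[j] | (nibbles[j + 1] << 4))
--     return (packed[0], packed[1], packed[2], packed[3]), True
-- ===== Notes on version B (the rewrite author's own statement) =====
-- stated objective: alternative
-- what changed: Replaces the per-slot low/high branch logic with a flat decomposition: decode the four bytes into 8 nibbles in scan order, find the first zero nibble with list.index, overwrite it, and repack pairs into bytes.
import Mathlib
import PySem

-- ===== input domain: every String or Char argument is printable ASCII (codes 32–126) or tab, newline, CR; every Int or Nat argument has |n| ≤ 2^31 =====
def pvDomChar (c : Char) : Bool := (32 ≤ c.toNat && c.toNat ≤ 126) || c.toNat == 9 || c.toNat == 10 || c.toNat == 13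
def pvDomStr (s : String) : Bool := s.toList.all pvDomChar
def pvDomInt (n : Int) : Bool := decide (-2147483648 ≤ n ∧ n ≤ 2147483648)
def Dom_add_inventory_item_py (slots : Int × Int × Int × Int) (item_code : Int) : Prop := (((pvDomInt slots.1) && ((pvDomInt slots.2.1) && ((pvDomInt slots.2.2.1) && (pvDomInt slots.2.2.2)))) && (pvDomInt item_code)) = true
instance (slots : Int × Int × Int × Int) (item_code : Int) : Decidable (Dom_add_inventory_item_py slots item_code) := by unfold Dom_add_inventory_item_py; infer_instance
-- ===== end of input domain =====

-- B replaces A's per-slot low/high branch logic by an equivalent different decomposition: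
-- decode the bytes into a flat list of 8 nibbles (low first), overwrite the first zero
-- nibble with the item code, and repack nibble pairs into bytes (objective: alternative).

-- ===== PORT A =====
-- Literal transliteration of A: the fixed four-iteration loop is unrolled, each
-- iteration keeping the same expressions and branch order (low test before high test).
def add_inventory_item_py (slots : Int × Int × Int × Int) (item_code : Int) : (Int × Int × Int × Int) × Bool :=
  let b0 := PySem.Int.band slots.1 255
  let b1 := PySem.Int.band slots.2.1 255
  let b2 := PySem.Int.band slots.2.2.1 255
  let b3 := PySem.Int.band slots.2.2.2 255
  let code := PySem.Int.band item_code 15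
  let l0 := PySem.Int.band b0 15
  let h0 := PySem.Int.band b0 240
  if l0 = 0 then ((PySem.Int.bor h0 code, b1, b2, b3), true)
  else if h0 = 0 then ((PySem.Int.bor (code <<< 4) l0, b1, b2, b3), true)
  else
    let l1 := PySem.Int.band b1 15
    let h1 := PySem.Int.band b1 240
    if l1 = 0 then ((b0, PySem.Int.bor h1 code, b2, b3), true)
    else if h1 = 0 then ((b0, PySem.Int.bor (code <<< 4) l1, b2, b3), true)
    else
      let l2 := PySem.Int.band b2 15
      let h2 := PySem.Int.band b2 240
      if l2 = 0 then ((b0, b1, PySem.Int.bor h2 code, b3), true)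
      else if h2 = 0 then ((b0, b1, PySem.Int.bor (code <<< 4) l2, b3), true)
      else
        let l3 := PySem.Int.band b3 15
        let h3 := PySem.Int.band b3 240
        if l3 = 0 then ((b0, b1, b2, PySem.Int.bor h3 code), true)
        else if h3 = 0 then ((b0, b1, b2, PySem.Int.bor (code <<< 4) l3), true)
        else ((b0, b1, b2, b3), false)

-- ===== PORT B =====
-- the nibble-decoding loop of Source B (append low nibble, then high nibble, per byte)
def pvNibbles : List Int → List Int
  | [] => []
  | b :: rest => PySem.Int.band b 15 :: PySem.Int.band (b >>> 4) 15 :: pvNibbles rest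

-- the packing loop of Source B (one byte per consecutive nibble pair)
def pvPack : List Int → List Int
  | lo :: hi :: rest => PySem.Int.bor lo (hi <<< 4) :: pvPack rest
  | _ => []

def add_inventory_item_py_alt (slots : Int × Int × Int × Int) (item_code : Int) : (Int × Int × Int × Int) × Bool :=
  let bytes := [PySem.Int.band slots.1 255, PySem.Int.band slots.2.1 255,
                PySem.Int.band slots.2.2.1 255, PySem.Int.band slots.2.2.2 255]
  let nibbles := pvNibbles bytes
  match PySem.List.index? nibbles 0 with
  | none => ((bytes.getD 0 0, bytes.getD 1 0, bytes.getD 2 0, bytes.getD 3 0), false)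
  | some i =>
      let nibbles' := nibbles.set i (PySem.Int.band item_code 15)
      let packed := pvPack nibbles'
      ((packed.getD 0 0, packed.getD 1 0, packed.getD 2 0, packed.getD 3 0), true)

-- ===== PRECONDITION & SPEC =====
def Spec_add_inventory_item_py (slots : Int × Int × Int × Int) (item_code : Int) (out : (Int × Int × Int × Int) × Bool) : Prop := out = add_inventory_item_py_alt slots item_code
instance (slots : Int × Int × Int × Int) (item_code : Int) (out : (Int × Int × Int × Int) × Bool) : Decidable (Spec_add_inventory_item_py slots item_code out) := by unfold Spec_add_inventory_item_py; infer_instance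

-- ===== CLAIM (what is proved, stated in full; the proofs are below) =====
def Claim_equal_add_inventory_item_py : Prop := ∀ (slots : Int × Int × Int × Int) (item_code : Int), Dom_add_inventory_item_py slots item_code → Spec_add_inventory_item_py slots item_code (add_inventory_item_py slots item_code)

-- ===== LEMMAS AND PROOFS =====

theorem pv_band255 (v : Int) : PySem.Int.band v 255 = v % 256 := by
  unfold PySem.Int.band
  by_cases h : 0 ≤ v
  · simp only [h, if_true, show (0:Int) ≤ 255 by norm_num, if_true]
    have h1 : v.toNat &&& (255:Int).toNat = v.toNat % 256 := by
      have := Nat.and_two_pow_sub_one_eq_mod v.toNat 8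
      simpa using this
    rw [h1]; omega
  · simp only [h, if_false, show (0:Int) ≤ 255 by norm_num, if_true]
    have h1 : (255:Int).toNat &&& (-v-1).toNat = (-v-1).toNat % 256 := by
      have := Nat.and_two_pow_sub_one_eq_mod (-v-1).toNat 8
      simpa [Nat.and_comm] using this
    rw [h1]; omega

theorem pv_band15 (v : Int) : PySem.Int.band v 15 = v % 16 := by
  unfold PySem.Int.band
  by_cases h : 0 ≤ v
  · simp only [h, if_true, show (0:Int) ≤ 15 by norm_num, if_true]
    have h1 : v.toNat &&& (15:Int).toNat = v.toNat % 16 := by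
      have := Nat.and_two_pow_sub_one_eq_mod v.toNat 4
      simpa using this
    rw [h1]; omega
  · simp only [h, if_false, show (0:Int) ≤ 15 by norm_num, if_true]
    have h1 : (15:Int).toNat &&& (-v-1).toNat = (-v-1).toNat % 16 := by
      have := Nat.and_two_pow_sub_one_eq_mod (-v-1).toNat 4
      simpa [Nat.and_comm] using this
    rw [h1]; omega

-- the high-nibble test of A agrees with the shifted-nibble test of B on masked bytes
theorem pv_hi_iff (w : Int) (h0 : 0 ≤ w) (h1 : w < 256) :
    (PySem.Int.band w 240 = 0) ↔ (PySem.Int.band (w >>> 4) 15 = 0) := by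
  have key : ∀ n : Fin 256,
      (PySem.Int.band (n:Int) 240 = 0) ↔ (PySem.Int.band ((n:Int) >>> 4) 15 = 0) := by
    set_option maxRecDepth 100000 in decide
  have hw : w = ((⟨w.toNat, by omega⟩ : Fin 256) : Int) := by
    simp [Int.toNat_of_nonneg h0]
  rw [hw]; exact key _

-- repacking the two nibbles of an untouched masked byte gives the byte back
theorem pv_repack (w : Int) (h0 : 0 ≤ w) (h1 : w < 256) :
    PySem.Int.bor (PySem.Int.band w 15) ((PySem.Int.band (w >>> 4) 15) <<< 4) = w := by
  have key : ∀ n : Fin 256,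
      PySem.Int.bor (PySem.Int.band (n:Int) 15) ((PySem.Int.band ((n:Int) >>> 4) 15) <<< 4)
        = (n:Int) := by
    set_option maxRecDepth 100000 in decide
  have hw : w = ((⟨w.toNat, by omega⟩ : Fin 256) : Int) := by
    simp [Int.toNat_of_nonneg h0]
  rw [hw]; exact key _

-- writing the code into the low nibble: A's 'high | code' = B's repacked 'code | (hi << 4)'
theorem pv_setlow (w c : Int) (h0 : 0 ≤ w) (h1 : w < 256) (h2 : 0 ≤ c) (h3 : c < 16) :
    PySem.Int.bor (PySem.Int.band w 240) c
      = PySem.Int.bor c ((PySem.Int.band (w >>> 4) 15) <<< 4) := by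
  have key : ∀ n : Fin 256, ∀ m : Fin 16,
      PySem.Int.bor (PySem.Int.band (n:Int) 240) (m:Int)
        = PySem.Int.bor (m:Int) ((PySem.Int.band ((n:Int) >>> 4) 15) <<< 4) := by
    set_option maxRecDepth 200000 in decide
  have hw : w = ((⟨w.toNat, by omega⟩ : Fin 256) : Int) := by
    simp [Int.toNat_of_nonneg h0]
  have hc : c = ((⟨c.toNat, by omega⟩ : Fin 16) : Int) := by
    simp [Int.toNat_of_nonneg h2]
  rw [hw, hc]; exact key _ _

-- ===== VERDICT (by name: the statement is the Claim_ definition above) =====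
theorem add_inventory_item_py_spec : Claim_equal_add_inventory_item_py := by
  intro slots item_code _
  unfold Spec_add_inventory_item_py
  obtain ⟨s0, s1, s2, s3⟩ := slots
  unfold add_inventory_item_py add_inventory_item_py_alt
  simp only [PySem.List.index?, pvNibbles]
  set c := PySem.Int.band item_code 15 with hcdef
  set w0 := PySem.Int.band s0 255 with hw0def
  set w1 := PySem.Int.band s1 255 with hw1def
  set w2 := PySem.Int.band s2 255 with hw2def
  set w3 := PySem.Int.band s3 255 with hw3def
  have hc : 0 ≤ c ∧ c < 16 := by rw [hcdef, pv_band15]; omega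
  have hb0 : 0 ≤ w0 ∧ w0 < 256 := by rw [hw0def, pv_band255]; omega
  have hb1 : 0 ≤ w1 ∧ w1 < 256 := by rw [hw1def, pv_band255]; omega
  have hb2 : 0 ≤ w2 ∧ w2 < 256 := by rw [hw2def, pv_band255]; omega
  have hb3 : 0 ≤ w3 ∧ w3 < 256 := by rw [hw3def, pv_band255]; omega
  have hrep0 := pv_repack w0 hb0.1 hb0.2
  have hrep1 := pv_repack w1 hb1.1 hb1.2
  have hrep2 := pv_repack w2 hb2.1 hb2.2
  have hrep3 := pv_repack w3 hb3.1 hb3.2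
  have hsl0 := pv_setlow w0 c hb0.1 hb0.2 hc.1 hc.2
  have hsl1 := pv_setlow w1 c hb1.1 hb1.2 hc.1 hc.2
  have hsl2 := pv_setlow w2 c hb2.1 hb2.2 hc.1 hc.2
  have hsl3 := pv_setlow w3 c hb3.1 hb3.2 hc.1 hc.2
  have hiff0 := pv_hi_iff w0 hb0.1 hb0.2
  have hiff1 := pv_hi_iff w1 hb1.1 hb1.2
  have hiff2 := pv_hi_iff w2 hb2.1 hb2.2
  have hiff3 := pv_hi_iff w3 hb3.1 hb3.2
  by_cases hl0 : PySem.Int.band w0 15 = 0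
  · simp [List.idxOf?, List.findIdx?_cons, hl0, pvPack, hrep1, hrep2, hrep3, hsl0]
  by_cases hh0 : PySem.Int.band w0 240 = 0
  · have hg0 : PySem.Int.band (w0 >>> 4) 15 = 0 := hiff0.mp hh0
    simp [List.idxOf?, List.findIdx?_cons, hl0, hh0, hg0, pvPack, hrep1, hrep2, hrep3, PySem.Int.bor_comm]
  have hg0 : ¬ PySem.Int.band (w0 >>> 4) 15 = 0 := fun h => hh0 (hiff0.mpr h)
  by_cases hl1 : PySem.Int.band w1 15 = 0
  · simp [List.idxOf?, List.findIdx?_cons, hl0, hh0, hg0, hl1, pvPack, hrep0, hrep2, hrep3, hsl1]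
  by_cases hh1 : PySem.Int.band w1 240 = 0
  · have hg1 : PySem.Int.band (w1 >>> 4) 15 = 0 := hiff1.mp hh1
    simp [List.idxOf?, List.findIdx?_cons, hl0, hh0, hg0, hl1, hh1, hg1, pvPack, hrep0, hrep2, hrep3, PySem.Int.bor_comm]
  have hg1 : ¬ PySem.Int.band (w1 >>> 4) 15 = 0 := fun h => hh1 (hiff1.mpr h)
  by_cases hl2 : PySem.Int.band w2 15 = 0
  · simp [List.idxOf?, List.findIdx?_cons, hl0, hh0, hg0, hl1, hh1, hg1, hl2, pvPack, hrep0, hrep1, hrep3, hsl2]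
  by_cases hh2 : PySem.Int.band w2 240 = 0
  · have hg2 : PySem.Int.band (w2 >>> 4) 15 = 0 := hiff2.mp hh2
    simp [List.idxOf?, List.findIdx?_cons, hl0, hh0, hg0, hl1, hh1, hg1, hl2, hh2, hg2, pvPack, hrep0, hrep1, hrep3, PySem.Int.bor_comm]
  have hg2 : ¬ PySem.Int.band (w2 >>> 4) 15 = 0 := fun h => hh2 (hiff2.mpr h)
  by_cases hl3 : PySem.Int.band w3 15 = 0
  · simp [List.idxOf?, List.findIdx?_cons, hl0, hh0, hg0, hl1, hh1, hg1, hl2, hh2, hg2, hl3, pvPack, hrep0, hrep1, hrep2, hsl3]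
  by_cases hh3 : PySem.Int.band w3 240 = 0
  · have hg3 : PySem.Int.band (w3 >>> 4) 15 = 0 := hiff3.mp hh3
    simp [List.idxOf?, List.findIdx?_cons, hl0, hh0, hg0, hl1, hh1, hg1, hl2, hh2, hg2, hl3, hh3, hg3, pvPack, hrep0, hrep1, hrep2, PySem.Int.bor_comm]
  have hg3 : ¬ PySem.Int.band (w3 >>> 4) 15 = 0 := fun h => hh3 (hiff3.mpr h)
  simp [List.idxOf?, List.findIdx?_cons, hl0, hh0, hg0, hl1, hh1, hg1, hl2, hh2, hg2, hl3, hh3, hg3]
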